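-- pv_equiv track=rewrite | github.com/Attta-pangestu/monitoring_folder_backup_notifkasi | src/database_validator.py | _detect_database_type
-- ===== SOURCE A (Python) =====
-- from typing import Dict, List, Tuple, Any, Optional
--
-- def _detect_database_type(tables: List[str]) -> str:
--     """Detect database type based on table names"""
--     table_names_upper = [t.upper() for t in tables]
--
--     # Check for Plantware specific tables
--     plantware_indicators = ['PR_TASKREG', 'PR_TASK', 'PR_PROJECT']
--     if any(indicator in table_names_upper for indicator in plantware_indicators):
--         return 'plantware'
--
--     # Check for Venus specific tables
--     venus_indicators = ['TA_MACHINE', 'TA_TRANSACTION', 'TA_LOG']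
--     if any(indicator in table_names_upper for indicator in venus_indicators):
--         return 'venus'
--
--     # Check for Staging specific tables
--     staging_indicators = ['GWSCANNER', 'GW_LOG', 'SCANNER_DATA']
--     if any(indicator in table_names_upper for indicator in staging_indicators):
--         return 'staging'
--
--     return 'unknown'
-- ===== SOURCE B (Python) =====
-- _CATEGORY_OF = {
--     'PR_TASKREG': 'plantware', 'PR_TASK': 'plantware', 'PR_PROJECT': 'plantware',
--     'TA_MACHINE': 'venus', 'TA_TRANSACTION': 'venus', 'TA_LOG': 'venus',
--     'GWSCANNER': 'staging', 'GW_LOG': 'staging', 'SCANNER_DATA': 'staging',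
-- }
--
-- def _detect_database_type(tables):
--     """Detect database type based on table names"""
--     found = set()
--     for t in tables:
--         cat = _CATEGORY_OF.get(t.upper())
--         if cat is not None:
--             found.add(cat)
--     for cat in ('plantware', 'venus', 'staging'):
--         if cat in found:
--             return cat
--     return 'unknown'
-- ===== Notes on version B (the rewrite author's own statement) =====
-- stated objective: faster
-- what changed: Replaces A's three sequential indicator-list scans over the uppercased table list with a single pass over the tables using one indicator-to-category dict, collecting matched categories into a set and then resolving by a fixed priority list.
import Mathlib
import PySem

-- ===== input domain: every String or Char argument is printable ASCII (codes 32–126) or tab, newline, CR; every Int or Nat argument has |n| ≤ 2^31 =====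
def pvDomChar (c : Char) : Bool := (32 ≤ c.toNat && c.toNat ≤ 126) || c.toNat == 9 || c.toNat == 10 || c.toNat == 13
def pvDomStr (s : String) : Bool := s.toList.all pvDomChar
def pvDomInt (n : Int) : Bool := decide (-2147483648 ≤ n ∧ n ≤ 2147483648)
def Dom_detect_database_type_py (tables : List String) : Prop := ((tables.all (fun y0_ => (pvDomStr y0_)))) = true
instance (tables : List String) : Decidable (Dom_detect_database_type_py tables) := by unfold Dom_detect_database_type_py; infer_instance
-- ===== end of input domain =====

-- B replaces A's three sequential indicator-list scans with one pass over the tables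
-- through an indicator→category dict plus a fixed-priority resolution (alternative decomposition).

-- ===== PORT A =====
def detect_database_type_py (tables : List String) : String :=
  let table_names_upper := tables.map PySem.Str.upper
  if ["PR_TASKREG", "PR_TASK", "PR_PROJECT"].any (fun i => table_names_upper.contains i) then
    "plantware"
  else if ["TA_MACHINE", "TA_TRANSACTION", "TA_LOG"].any (fun i => table_names_upper.contains i) then
    "venus"
  else if ["GWSCANNER", "GW_LOG", "SCANNER_DATA"].any (fun i => table_names_upper.contains i) then
    "staging"
  else
    "unknown"

-- ===== PORT B =====
def pvCategoryOf : PySem.Dict String String := PySem.Dict.mk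
  [("PR_TASKREG", "plantware"), ("PR_TASK", "plantware"), ("PR_PROJECT", "plantware"),
   ("TA_MACHINE", "venus"), ("TA_TRANSACTION", "venus"), ("TA_LOG", "venus"),
   ("GWSCANNER", "staging"), ("GW_LOG", "staging"), ("SCANNER_DATA", "staging")]

-- the 'found' set accumulated by B's single pass over the tables
def pvFound (tables : List String) : PySem.Set String :=
  tables.foldl (fun acc t =>
    match PySem.Dict.get? pvCategoryOf (PySem.Str.upper t) with
    | some cat => PySem.Set.add acc cat
    | none => acc) PySem.Set.empty

def detect_database_type_py_alt (tables : List String) : String :=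
  let found := pvFound tables
  -- the priority loop over ('plantware', 'venus', 'staging'), unrolled
  if PySem.Set.contains found "plantware" then "plantware"
  else if PySem.Set.contains found "venus" then "venus"
  else if PySem.Set.contains found "staging" then "staging"
  else "unknown"

-- ===== PRECONDITION & SPEC =====
def Spec_detect_database_type_py (tables : List String) (out : String) : Prop := out = detect_database_type_py_alt tables
instance (tables : List String) (out : String) : Decidable (Spec_detect_database_type_py tables out) := by unfold Spec_detect_database_type_py; infer_instance

-- ===== CLAIM (what is proved, stated in full; the proofs are below) =====
def Claim_equal_detect_database_type_py : Prop := ∀ (tables : List String), Dom_detect_database_type_py tables → Spec_detect_database_type_py tables (detect_database_type_py tables)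

-- ===== LEMMAS AND PROOFS =====

theorem mem_foldl_found (tables : List String) (acc : PySem.Set String) (c : String) :
    c ∈ tables.foldl (fun acc t =>
      match PySem.Dict.get? pvCategoryOf (PySem.Str.upper t) with
      | some cat => PySem.Set.add acc cat
      | none => acc) acc ↔
    c ∈ acc ∨ ∃ t ∈ tables, PySem.Dict.get? pvCategoryOf (PySem.Str.upper t) = some c := by
  induction tables generalizing acc with
  | nil => simp [List.foldl]
  | cons x xs ih =>
    simp only [List.foldl_cons]
    cases h : PySem.Dict.get? pvCategoryOf (PySem.Str.upper x) with
    | none =>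
      rw [ih]
      constructor
      · rintro (hc | ⟨t, ht, hc⟩)
        · exact Or.inl hc
        · exact Or.inr ⟨t, List.mem_cons_of_mem _ ht, hc⟩
      · rintro (hc | ⟨t, ht, hc⟩)
        · exact Or.inl hc
        · rcases List.mem_cons.mp ht with rfl | ht'
          · rw [h] at hc; exact absurd hc (by simp)
          · exact Or.inr ⟨t, ht', hc⟩
    | some cat =>
      rw [ih]
      simp only [PySem.Set.mem_add]
      constructor
      · rintro (⟨hc | hc⟩ | ⟨t, ht, hc⟩)
        · exact Or.inl hc
        · exact Or.inr ⟨x, List.mem_cons_self, by rw [h, hc]⟩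
        · exact Or.inr ⟨t, List.mem_cons_of_mem _ ht, hc⟩
      · rintro (hc | ⟨t, ht, hc⟩)
        · exact Or.inl (Or.inl hc)
        · rcases List.mem_cons.mp ht with rfl | ht'
          · rw [h] at hc; exact Or.inl (Or.inr (Option.some_inj.mp hc).symm)
          · exact Or.inr ⟨t, ht', hc⟩

theorem mem_found (tables : List String) (c : String) :
    c ∈ pvFound tables ↔
    ∃ t ∈ tables, PySem.Dict.get? pvCategoryOf (PySem.Str.upper t) = some c := by
  unfold pvFound
  rw [mem_foldl_found]
  simp [PySem.Set.empty]

theorem cat_plantware (u : String) :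
    PySem.Dict.get? pvCategoryOf u = some "plantware" ↔
    u = "PR_TASKREG" ∨ u = "PR_TASK" ∨ u = "PR_PROJECT" := by
  simp only [pvCategoryOf, PySem.Dict.get?_mk_cons, beq_iff_eq]
  split_ifs <;> simp_all [PySem.Dict.get?, eq_comm]

theorem cat_venus (u : String) :
    PySem.Dict.get? pvCategoryOf u = some "venus" ↔
    u = "TA_MACHINE" ∨ u = "TA_TRANSACTION" ∨ u = "TA_LOG" := by
  simp only [pvCategoryOf, PySem.Dict.get?_mk_cons, beq_iff_eq]
  split_ifs <;> simp_all [PySem.Dict.get?, eq_comm]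

theorem cat_staging (u : String) :
    PySem.Dict.get? pvCategoryOf u = some "staging" ↔
    u = "GWSCANNER" ∨ u = "GW_LOG" ∨ u = "SCANNER_DATA" := by
  simp only [pvCategoryOf, PySem.Dict.get?_mk_cons, beq_iff_eq]
  split_ifs <;> simp_all [PySem.Dict.get?, eq_comm]

-- A's three-indicator scan condition, as a proposition over the tables
theorem condA (tables : List String) (i1 i2 i3 : String) :
    ([i1, i2, i3].any (fun i => (tables.map PySem.Str.upper).contains i)) = true ↔
    ∃ t ∈ tables, PySem.Str.upper t = i1 ∨ PySem.Str.upper t = i2 ∨ PySem.Str.upper t = i3 := by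
  simp only [List.any_cons, List.any_nil, Bool.or_false, Bool.or_eq_true,
    List.contains_iff_mem, List.mem_map]
  constructor
  · rintro (⟨a, ha, h⟩ | ⟨a, ha, h⟩ | ⟨a, ha, h⟩)
    exacts [⟨a, ha, Or.inl h⟩, ⟨a, ha, Or.inr (Or.inl h)⟩, ⟨a, ha, Or.inr (Or.inr h)⟩]
  · rintro ⟨a, ha, h | h | h⟩
    exacts [Or.inl ⟨a, ha, h⟩, Or.inr (Or.inl ⟨a, ha, h⟩), Or.inr (Or.inr ⟨a, ha, h⟩)]

-- B's membership tests, as the same propositions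
theorem condB_plantware (tables : List String) :
    PySem.Set.contains (pvFound tables) "plantware" = true ↔
    ∃ t ∈ tables, PySem.Str.upper t = "PR_TASKREG" ∨ PySem.Str.upper t = "PR_TASK" ∨
      PySem.Str.upper t = "PR_PROJECT" := by
  rw [PySem.Set.contains_iff, mem_found]
  simp only [cat_plantware]

theorem condB_venus (tables : List String) :
    PySem.Set.contains (pvFound tables) "venus" = true ↔
    ∃ t ∈ tables, PySem.Str.upper t = "TA_MACHINE" ∨ PySem.Str.upper t = "TA_TRANSACTION" ∨
      PySem.Str.upper t = "TA_LOG" := by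
  rw [PySem.Set.contains_iff, mem_found]
  simp only [cat_venus]

theorem condB_staging (tables : List String) :
    PySem.Set.contains (pvFound tables) "staging" = true ↔
    ∃ t ∈ tables, PySem.Str.upper t = "GWSCANNER" ∨ PySem.Str.upper t = "GW_LOG" ∨
      PySem.Str.upper t = "SCANNER_DATA" := by
  rw [PySem.Set.contains_iff, mem_found]
  simp only [cat_staging]

-- ===== VERDICT (by name: the statement is the Claim_ definition above) =====
theorem detect_database_type_py_spec : Claim_equal_detect_database_type_py := by
  intro tables _
  unfold Spec_detect_database_type_py detect_database_type_py detect_database_type_py_alt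
  by_cases hp : ∃ t ∈ tables, PySem.Str.upper t = "PR_TASKREG" ∨ PySem.Str.upper t = "PR_TASK" ∨
      PySem.Str.upper t = "PR_PROJECT" <;>
  by_cases hv : ∃ t ∈ tables, PySem.Str.upper t = "TA_MACHINE" ∨
      PySem.Str.upper t = "TA_TRANSACTION" ∨ PySem.Str.upper t = "TA_LOG" <;>
  by_cases hs : ∃ t ∈ tables, PySem.Str.upper t = "GWSCANNER" ∨ PySem.Str.upper t = "GW_LOG" ∨
      PySem.Str.upper t = "SCANNER_DATA" <;>
  simp only [condA, condB_plantware, condB_venus, condB_staging, hp, hv, hs,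
    if_true, if_false]
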